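-- pv_equiv track=rewrite | github.com/pubgrub/adventOfCode2021 | day11.py | raiseEnergy
-- ===== SOURCE A (Python) =====
-- neighors = [ -13, -12, -11, -1, 1, 11, 12, 13]
--
-- def raiseEnergy( oct, octs, has_flashed, flashCount):
--   octs[ oct] += 1
--   if octs[ oct] == 10:
--     has_flashed.add( oct)
--     octs[ oct] = 0
--     flashCount += 1
--     for n in neighors:
--       neighborPos = oct + n
--       if neighborPos < 0 or neighborPos >= len(octs) or octs[ neighborPos] == -1 or neighborPos in has_flashed:
--           continue
--       ( octs, has_flashed, flashCount) = raiseEnergy( neighborPos, octs, has_flashed, flashCount)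
--   return ( octs, has_flashed, flashCount)
-- ===== SOURCE B (Python) =====
-- neighors = [ -13, -12, -11, -1, 1, 11, 12, 13]
--
-- def raiseEnergy(oct, octs, has_flashed, flashCount):
--     # Iterative flood fill with an explicit stack instead of recursion.
--     octs[oct] += 1
--     if octs[oct] != 10:
--         return (octs, has_flashed, flashCount)
--     has_flashed.add(oct)
--     octs[oct] = 0
--     flashCount += 1
--     stack = [oct + n for n in reversed(neighors)]
--     while stack:
--         cell = stack.pop()
--         if cell < 0 or cell >= len(octs) or octs[cell] == -1 or cell in has_flashed:
--             continue
--         octs[cell] += 1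
--         if octs[cell] == 10:
--             has_flashed.add(cell)
--             octs[cell] = 0
--             flashCount += 1
--             stack.extend(cell + n for n in reversed(neighors))
--     return (octs, has_flashed, flashCount)
-- ===== Notes on version B (the rewrite author's own statement) =====
-- stated objective: alternative
-- what changed: Replaces the recursive flash propagation by an iterative flood fill over an explicit stack: neighbours are pushed unconditionally and the bounds/wall/already-flashed guards are re-checked at pop time, which reproduces the recursion's synchronous has_flashed checks without any recursion.
import Mathlib
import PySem

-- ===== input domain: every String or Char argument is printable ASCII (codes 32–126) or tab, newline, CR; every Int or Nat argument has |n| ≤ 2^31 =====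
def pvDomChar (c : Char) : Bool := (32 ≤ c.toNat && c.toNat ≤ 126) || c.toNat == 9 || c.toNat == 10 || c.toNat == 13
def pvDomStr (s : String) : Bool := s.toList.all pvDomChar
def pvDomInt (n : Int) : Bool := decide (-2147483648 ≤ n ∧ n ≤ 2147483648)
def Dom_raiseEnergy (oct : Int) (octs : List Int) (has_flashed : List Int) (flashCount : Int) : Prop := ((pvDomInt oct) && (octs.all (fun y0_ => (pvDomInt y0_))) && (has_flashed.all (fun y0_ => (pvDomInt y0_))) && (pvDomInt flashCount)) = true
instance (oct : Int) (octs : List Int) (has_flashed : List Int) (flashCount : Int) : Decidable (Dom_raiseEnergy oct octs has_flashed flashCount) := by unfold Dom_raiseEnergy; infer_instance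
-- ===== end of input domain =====

-- B replaces A's recursion by an iterative flood fill over an explicit stack (objective: alternative).
-- Both Pythons mutate `octs`/`has_flashed` in place the same way; the theorems are about the returned triple.

-- shared module constant `neighors` and the two indexing expressions both Pythons use
def pvNeighbors : List Int := [-13, -12, -11, -1, 1, 11, 12, 13]

def pvGetI (xs : List Int) (i : Int) : Int := PySem.List.pyGetD xs i 0

def pvSetI (xs : List Int) (i : Int) (v : Int) : List Int := PySem.List.pySetD xs i v

@[simp] lemma length_pvSetI (xs : List Int) (i v : Int) : (pvSetI xs i v).length = xs.length := by
  exact PySem.List.length_pySetD xs i v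

-- ===== PORT A =====
-- A's recursion, made total with fuel (each nested call newly flashes a distinct in-range cell,
-- so depth ≤ octs.length + 1 and fuel octs.length + 2 is never exhausted on inputs in Pre_).
def raiseEnergyRec : Nat → Int → List Int → List Int → Int → List Int × List Int × Int
  | 0, _, octs, hf, fc => (octs, hf, fc)
  | f + 1, oct, octs, hf, fc =>
    let octs1 := pvSetI octs oct (pvGetI octs oct + 1)         -- octs[oct] += 1
    if pvGetI octs1 oct = 10 then
      pvNeighbors.foldl
        (fun st n =>
          let p := oct + n
          if p < 0 ∨ (st.1.length : Int) ≤ p ∨ pvGetI st.1 p = -1 ∨ PySem.Set.contains st.2.1 p then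
            st
          else raiseEnergyRec f p st.1 st.2.1 st.2.2)
        (pvSetI octs1 oct 0, PySem.Set.add hf oct, fc + 1)
    else (octs1, hf, fc)

def raiseEnergy (oct : Int) (octs : List Int) (has_flashed : List Int) (flashCount : Int) : List Int × List Int × Int :=
  raiseEnergyRec (octs.length + 2) oct octs has_flashed flashCount

-- ===== PORT B =====
-- number of in-range cells already flashed (termination measure for B's while loop)
def pvFlashedCard (L : Nat) (hf : List Int) : Nat :=
  ((Finset.range L).filter (fun i : Nat => PySem.Set.contains hf ((i : Nat) : Int) = true)).card

lemma pvFlashedCard_le (L : Nat) (hf : List Int) : pvFlashedCard L hf ≤ L := by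
  exact le_trans (Finset.card_filter_le _ _) (by simp)

lemma pvFlashedCard_add_new (L : Nat) (hf : List Int) (c : Int) (h0 : 0 ≤ c) (h1 : c < (L : Int))
    (h2 : ¬ PySem.Set.contains hf c = true) :
    pvFlashedCard L (PySem.Set.add hf c) = pvFlashedCard L hf + 1 := by
  unfold pvFlashedCard
  have hset : (Finset.range L).filter (fun i : Nat => PySem.Set.contains (PySem.Set.add hf c) ((i:Nat):Int) = true)
      = insert c.toNat ((Finset.range L).filter (fun i : Nat => PySem.Set.contains hf ((i:Nat):Int) = true)) := by
    ext i
    simp only [Finset.mem_filter, Finset.mem_insert, Finset.mem_range,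
      PySem.Set.contains_iff, PySem.Set.mem_add]
    constructor
    · rintro ⟨hi, hm | he⟩
      · exact Or.inr ⟨hi, hm⟩
      · left; omega
    · rintro (rfl | ⟨hi, hm⟩)
      · exact ⟨by omega, Or.inr (by omega)⟩
      · exact ⟨hi, Or.inl hm⟩
  rw [hset, Finset.card_insert_of_notMem]
  simp only [Finset.mem_filter, Finset.mem_range, PySem.Set.contains_iff, not_and]
  intro _ hmem
  apply h2
  rw [PySem.Set.contains_iff]
  convert hmem
  omega

-- B's while loop: head of the list is the top of the Python stack; `reversed(neighors)` pushed
-- onto the stack = the neighbour offsets prepended in their original order.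
def raiseEnergyLoop : List Int → List Int → List Int → Int → List Int × List Int × Int
  | [], octs, hf, fc => (octs, hf, fc)
  | c :: rest, octs, hf, fc =>
    if c < 0 ∨ (octs.length : Int) ≤ c ∨ pvGetI octs c = -1 ∨ PySem.Set.contains hf c then
      raiseEnergyLoop rest octs hf fc
    else
      let octs1 := pvSetI octs c (pvGetI octs c + 1)           -- octs[cell] += 1
      if pvGetI octs1 c = 10 then
        raiseEnergyLoop (pvNeighbors.map (fun n => c + n) ++ rest)
          (pvSetI octs1 c 0) (PySem.Set.add hf c) (fc + 1)
      else raiseEnergyLoop rest octs1 hf fc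
  termination_by stack octs hf _ => stack.length + 9 * (octs.length - pvFlashedCard octs.length hf)
  decreasing_by
  · simp only [List.length_cons]; omega
  · rename_i hguard _
    push_neg at hguard
    obtain ⟨h0, h1, _, h3⟩ := hguard
    simp only [List.length_append, List.length_map, List.length_cons, List.length_nil, length_pvSetI, pvNeighbors]
    have hadd := pvFlashedCard_add_new octs.length hf c (by omega) (by omega) (by simpa using h3)
    have hle := pvFlashedCard_le octs.length (PySem.Set.add hf c)
    omega
  · simp only [List.length_cons, length_pvSetI]; omega

def raiseEnergy_alt (oct : Int) (octs : List Int) (has_flashed : List Int) (flashCount : Int) : List Int × List Int × Int :=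
  let octs1 := pvSetI octs oct (pvGetI octs oct + 1)
  if pvGetI octs1 oct = 10 then
    raiseEnergyLoop (pvNeighbors.map (fun n => oct + n))
      (pvSetI octs1 oct 0) (PySem.Set.add has_flashed oct) (flashCount + 1)
  else (octs1, has_flashed, flashCount)

-- ===== PRECONDITION & SPEC =====
-- Pre_ excludes exactly the inputs where `octs[oct]` raises IndexError in Python (both A and B raise there).
def Pre_raiseEnergy (oct : Int) (octs : List Int) (has_flashed : List Int) (flashCount : Int) : Prop :=
  PySem.Raise.InRange octs.length oct
instance (oct : Int) (octs : List Int) (has_flashed : List Int) (flashCount : Int) : Decidable (Pre_raiseEnergy oct octs has_flashed flashCount) := by unfold Pre_raiseEnergy; infer_instance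

def pvWitness_raiseEnergy : Int × List Int × List Int × Int := (0, [9, 1], [], 0)

def Spec_raiseEnergy (oct : Int) (octs : List Int) (has_flashed : List Int) (flashCount : Int) (out : List Int × List Int × Int) : Prop := out = raiseEnergy_alt oct octs has_flashed flashCount
instance (oct : Int) (octs : List Int) (has_flashed : List Int) (flashCount : Int) (out : List Int × List Int × Int) : Decidable (Spec_raiseEnergy oct octs has_flashed flashCount out) := by unfold Spec_raiseEnergy; infer_instance

-- ===== CLAIM (what is proved, stated in full; the proofs are below) =====
def Claim_equal_raiseEnergy : Prop := ∀ (oct : Int) (octs : List Int) (has_flashed : List Int) (flashCount : Int), Dom_raiseEnergy oct octs has_flashed flashCount → Pre_raiseEnergy oct octs has_flashed flashCount → Spec_raiseEnergy oct octs has_flashed flashCount (raiseEnergy oct octs has_flashed flashCount)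

-- ===== LEMMAS AND PROOFS =====

-- the body of A's neighbour loop, as a function of the neighbour POSITION
def pvProcA (f : Nat) (st : List Int × List Int × Int) (p : Int) : List Int × List Int × Int :=
  if p < 0 ∨ (st.1.length : Int) ≤ p ∨ pvGetI st.1 p = -1 ∨ PySem.Set.contains st.2.1 p then st
  else raiseEnergyRec f p st.1 st.2.1 st.2.2

lemma raiseEnergyRec_succ (f : Nat) (oct : Int) (octs hf : List Int) (fc : Int) :
    raiseEnergyRec (f + 1) oct octs hf fc =
      (let octs1 := pvSetI octs oct (pvGetI octs oct + 1)
       if pvGetI octs1 oct = 10 then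
         List.foldl (pvProcA f) (pvSetI octs1 oct 0, PySem.Set.add hf oct, fc + 1)
           (pvNeighbors.map (fun n => oct + n))
       else (octs1, hf, fc)) := by
  simp only [raiseEnergyRec, List.foldl_map]
  rfl

-- "state only grows": length preserved, flashed set only gains members
def pvPres (a b : List Int × List Int × Int) : Prop :=
  b.1.length = a.1.length ∧
    ∀ x, PySem.Set.contains a.2.1 x = true → PySem.Set.contains b.2.1 x = true

lemma pvPres_trans {a b c} (h1 : pvPres a b) (h2 : pvPres b c) : pvPres a c := by
  exact ⟨h2.1.trans h1.1, fun x hx => h2.2 x (h1.2 x hx)⟩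

lemma pvPres_foldl {g : (List Int × List Int × Int) → Int → (List Int × List Int × Int)}
    (h : ∀ st p, pvPres st (g st p)) :
    ∀ (l : List Int) st, pvPres st (List.foldl g st l) := by
  intro l
  induction l with
  | nil => intro st; exact ⟨rfl, fun _ hx => hx⟩
  | cons p l ih => intro st; exact pvPres_trans (h st p) (ih (g st p))

lemma contains_add_of_contains (s : List Int) (c x : Int)
    (h : PySem.Set.contains s x = true) : PySem.Set.contains (PySem.Set.add s c) x = true := by
  simp only [PySem.Set.contains_iff, PySem.Set.mem_add] at *
  exact Or.inl h

lemma raiseEnergyRec_pres : ∀ (f : Nat) (oct : Int) (octs hf : List Int) (fc : Int),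
    pvPres (octs, hf, fc) (raiseEnergyRec f oct octs hf fc) := by
  intro f
  induction f with
  | zero =>
    intro oct octs hf fc
    exact ⟨rfl, fun _ h => h⟩
  | succ f ih =>
    intro oct octs hf fc
    rw [raiseEnergyRec_succ]
    by_cases h : pvGetI (pvSetI octs oct (pvGetI octs oct + 1)) oct = 10
    · simp only [h, if_pos]
      refine pvPres_trans (b := (pvSetI (pvSetI octs oct (pvGetI octs oct + 1)) oct 0,
        PySem.Set.add hf oct, fc + 1)) ⟨by simp, fun x hx => contains_add_of_contains _ _ _ hx⟩ ?_
      apply pvPres_foldl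
      intro st p
      unfold pvProcA
      split
      · exact ⟨rfl, fun _ hx => hx⟩
      · obtain ⟨o, fl, c⟩ := st
        exact ih p o fl c
    · simp only [h, if_neg, if_false]
      exact ⟨by simp, fun _ hx => hx⟩

lemma pvFlashedCard_mono (L : Nat) (hf hf' : List Int)
    (h : ∀ x, PySem.Set.contains hf x = true → PySem.Set.contains hf' x = true) :
    pvFlashedCard L hf ≤ pvFlashedCard L hf' := by
  apply Finset.card_le_card
  intro i hi
  simp only [Finset.mem_filter] at *
  exact ⟨hi.1, h _ hi.2⟩

lemma pvProcA_pres (f : Nat) : ∀ st p, pvPres st (pvProcA f st p) := by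
  intro st p
  unfold pvProcA
  split
  · exact ⟨rfl, fun _ hx => hx⟩
  · obtain ⟨o, fl, c⟩ := st
    exact raiseEnergyRec_pres f p o fl c

-- the simulation: running B's stack machine on `pending ++ rest` first performs exactly
-- A's neighbour loop over `pending`
lemma pvBridge : ∀ (k : Nat) (pending rest octs hf : List Int) (fc : Int) (f : Nat),
    octs.length - pvFlashedCard octs.length hf ≤ k →
    1 + (octs.length - pvFlashedCard octs.length hf) ≤ f →
    raiseEnergyLoop (pending ++ rest) octs hf fc =
      raiseEnergyLoop rest (List.foldl (pvProcA f) (octs, hf, fc) pending).1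
        (List.foldl (pvProcA f) (octs, hf, fc) pending).2.1
        (List.foldl (pvProcA f) (octs, hf, fc) pending).2.2 := by
  intro k
  induction k using Nat.strong_induction_on with
  | _ k IH =>
  intro pending
  induction pending with
  | nil => intro rest octs hf fc f _ _; rfl
  | cons p pend ihp =>
    intro rest octs hf fc f hk hfge
    obtain ⟨g, rfl⟩ : ∃ g, f = g + 1 := ⟨f - 1, by omega⟩
    rw [List.cons_append, raiseEnergyLoop]
    simp only [List.foldl_cons]
    by_cases hg : p < 0 ∨ (octs.length : Int) ≤ p ∨ pvGetI octs p = -1 ∨ PySem.Set.contains hf p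
    · rw [if_pos hg]
      have hproc : pvProcA (g + 1) (octs, hf, fc) p = (octs, hf, fc) := by
        unfold pvProcA; rw [if_pos hg]
      rw [hproc]
      exact ihp rest octs hf fc (g + 1) hk hfge
    · have hproc : pvProcA (g + 1) (octs, hf, fc) p = raiseEnergyRec (g + 1) p octs hf fc := by
        unfold pvProcA; rw [if_neg hg]
      rw [if_neg hg, hproc, raiseEnergyRec_succ]
      by_cases hfl : pvGetI (pvSetI octs p (pvGetI octs p + 1)) p = 10
      · simp only [hfl, if_pos]
        push_neg at hg
        obtain ⟨hp0, hp1, hp2, hp3⟩ := hg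
        have hcard := pvFlashedCard_add_new octs.length hf p (by omega) (by omega)
          (by simpa using hp3)
        have hle2 := pvFlashedCard_le octs.length (PySem.Set.add hf p)
        -- state after the flash of p
        set st2 : List Int × List Int × Int :=
          (pvSetI (pvSetI octs p (pvGetI octs p + 1)) p 0, PySem.Set.add hf p, fc + 1) with hst2
        have hL2 : st2.1.length = octs.length := by simp [hst2]
        have hstep1 := IH (k - 1) (by omega) (pvNeighbors.map (fun n => p + n)) (pend ++ rest)
          st2.1 st2.2.1 st2.2.2 g (by rw [hL2]; simp only [hst2]; omega)
          (by rw [hL2]; simp only [hst2]; omega)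
        set T := List.foldl (pvProcA g) (st2.1, st2.2.1, st2.2.2) (pvNeighbors.map (fun n => p + n)) with hT
        have hpres : pvPres st2 T := by
          rw [hT]
          exact pvPres_foldl (pvProcA_pres g) _ st2
        have hLT : T.1.length = octs.length := by rw [hpres.1, hL2]
        have hcm := pvFlashedCard_mono octs.length st2.2.1 T.2.1 hpres.2
        have hstep2 := IH (k - 1) (by omega) pend rest T.1 T.2.1 T.2.2 (g + 1)
          (by rw [hLT]; simp only [hst2] at hcm; omega)
          (by rw [hLT]; simp only [hst2] at hcm; omega)
        rw [hstep1]
        exact hstep2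
      · simp only [hfl, if_neg, if_false]
        exact ihp rest (pvSetI octs p (pvGetI octs p + 1)) hf fc (g + 1)
          (by simpa using hk) (by simpa using hfge)

-- ===== VERDICT (by name: the statement is the Claim_ definition above) =====
theorem raiseEnergy_spec : Claim_equal_raiseEnergy := by
  intro oct octs hf fc _ _
  unfold Spec_raiseEnergy raiseEnergy raiseEnergy_alt
  rw [show octs.length + 2 = (octs.length + 1) + 1 from rfl, raiseEnergyRec_succ]
  by_cases h : pvGetI (pvSetI octs oct (pvGetI octs oct + 1)) oct = 10
  · simp only [h, if_pos]
    have hb := pvBridge octs.length (pvNeighbors.map (fun n => oct + n)) []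
      (pvSetI (pvSetI octs oct (pvGetI octs oct + 1)) oct 0) (PySem.Set.add hf oct) (fc + 1)
      (octs.length + 1) (by simp only [length_pvSetI]; omega) (by simp only [length_pvSetI]; omega)
    rw [List.append_nil] at hb
    rw [hb, raiseEnergyLoop]
  · simp only [h, if_neg, if_false]
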